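-- pv_equiv track=rewrite | github.com/OctopusTentacles/002_Python | Part2_Modul06/06_6_task_8.py | palindron
-- ===== SOURCE A (Python) =====
-- def palindron(text):
--     count = 0
--     while True:
--         if text == text[::-1]:
--             return True
--         elif count != len(text) - 1:
--             text = text[1:] + text[0]
--             count += 1
--         else:
--             return False
-- ===== SOURCE B (Python) =====
-- def palindron(text):
--     n = len(text)
--     d = text + text
--     return n == 0 or any(
--         all(d[i + j] == d[i + n - 1 - j] for j in range(n // 2))
--         for i in range(n)
--     )
-- ===== Notes on version B (the rewrite author's own statement) =====
-- stated objective: alternative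
-- what changed: Replaces the while-loop that rebuilds the rotated string and compares it with a full reversed copy at every step by a scan over the doubled string d = text+text, testing each rotation window in place with two-pointer character comparisons, with no string rebuilding or reversal.
import Mathlib
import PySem

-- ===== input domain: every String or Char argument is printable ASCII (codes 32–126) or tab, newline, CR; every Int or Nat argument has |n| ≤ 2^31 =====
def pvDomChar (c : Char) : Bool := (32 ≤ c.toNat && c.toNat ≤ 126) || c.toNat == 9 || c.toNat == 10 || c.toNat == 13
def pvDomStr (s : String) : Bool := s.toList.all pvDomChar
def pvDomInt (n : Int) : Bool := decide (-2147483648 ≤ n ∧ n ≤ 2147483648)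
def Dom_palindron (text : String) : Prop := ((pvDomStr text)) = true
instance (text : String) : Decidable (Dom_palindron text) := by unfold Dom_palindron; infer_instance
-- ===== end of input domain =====

-- B replaces A's rotate-and-compare-with-reversal while-loop by two-pointer window checks on the doubled string (objective: alternative).

-- ===== PORT A =====
-- A's while-loop: state (text, count); each non-returning iteration does text = text[1:] + text[0]
-- (here t.drop 1 ++ t.take 1: text is nonempty in that branch, so text[0] is t.take 1) and count += 1.
-- `fuel` only makes the recursion total; it starts at len(text)-1 and equals (len-1)-count throughout,
-- so the `fuel = 0` fallback is never taken while count ≠ len-1.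
def palLoopA (t : List Char) (count : Nat) (fuel : Nat) : Bool :=
  if t = t.reverse then true
  else if count ≠ t.length - 1 then
    match fuel with
    | 0 => false  -- unreachable under the fuel invariant
    | f + 1 => palLoopA (t.drop 1 ++ t.take 1) (count + 1) f
  else false

def palindron (text : String) : Bool :=
  palLoopA text.toList 0 (text.toList.length - 1)

-- ===== PORT B =====
def palindron_alt (text : String) : Bool :=
  let n := text.toList.length
  let d := text.toList ++ text.toList
  n == 0 ||
    (List.range n).any (fun i =>
      (List.range (n / 2)).all (fun j =>
        d.getD (i + j) ' ' == d.getD (i + n - 1 - j) ' '))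

-- ===== PRECONDITION & SPEC =====
def Spec_palindron (text : String) (out : Bool) : Prop := out = palindron_alt text
instance (text : String) (out : Bool) : Decidable (Spec_palindron text out) := by unfold Spec_palindron; infer_instance

-- ===== CLAIM (what is proved, stated in full; the proofs are below) =====
def Claim_equal_palindron : Prop := ∀ (text : String), Dom_palindron text → Spec_palindron text (palindron text)

-- ===== LEMMAS AND PROOFS =====

-- one step of A's loop advances the rotation index
theorem rot_step (t : List Char) (i : Nat) (hn : 0 < t.length) :
    (t.rotate i).drop 1 ++ (t.rotate i).take 1 = t.rotate (i + 1) := by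
  rw [← List.rotate_eq_drop_append_take (by rw [List.length_rotate]; omega),
      List.rotate_rotate]

theorem getD_reverse (l : List Char) (j : Nat) (hj : j < l.length) :
    l.reverse.getD j ' ' = l.getD (l.length - 1 - j) ' ' := by
  rw [List.getD_eq_getElem _ ' ' (by simpa using hj),
      List.getD_eq_getElem _ ' ' (by omega), List.getElem_reverse]

-- indexing the doubled list inside a window is indexing the rotation
theorem doubled_getD (t : List Char) (i j : Nat) (hi : i < t.length) (hj : j < t.length) :
    (t ++ t).getD (i + j) ' ' = (t.rotate i).getD j ' ' := by
  rw [List.getD_eq_getElem _ ' ' (by simp; omega),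
      List.getD_eq_getElem _ ' ' (by rw [List.length_rotate]; omega),
      List.getElem_rotate]
  rcases Nat.lt_or_ge (i + j) t.length with h | h
  · rw [List.getElem_append_left (by omega)]
    congr 1
    rw [Nat.mod_eq_of_lt (by omega)]
    omega
  · rw [List.getElem_append_right (by omega)]
    congr 1
    rw [Nat.mod_eq_sub_mod (by omega), Nat.mod_eq_of_lt (by omega)]
    omega

-- palindrome ↔ half-length pointwise check
theorem pal_iff_half (l : List Char) :
    (l = l.reverse) ↔ (∀ j < l.length / 2, l.getD j ' ' = l.getD (l.length - 1 - j) ' ') := by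
  constructor
  · intro h j hj
    calc l.getD j ' ' = l.reverse.getD j ' ' := by rw [← h]
    _ = l.getD (l.length - 1 - j) ' ' := getD_reverse l j (by omega)
  · intro h
    apply List.ext_getElem (by simp)
    intro i h1 h2
    rw [List.getElem_reverse]
    rw [← List.getD_eq_getElem l ' ' h1,
        ← List.getD_eq_getElem l ' ' (show l.length - 1 - i < l.length by omega)]
    rcases Nat.lt_or_ge i (l.length / 2) with hc | hc
    · exact h i hc
    · rcases Nat.lt_or_ge (l.length - 1 - i) (l.length / 2) with hc2 | hc2
      · have := h (l.length - 1 - i) hc2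
        rw [show l.length - 1 - (l.length - 1 - i) = i by omega] at this
        exact this.symm
      · rw [show l.length - 1 - i = i by omega]

-- the inner `all` of B tests exactly `t.rotate i` being a palindrome
theorem inner_all_iff (t : List Char) (i : Nat) (hi : i < t.length) :
    (((List.range (t.length / 2)).all (fun j =>
        (t ++ t).getD (i + j) ' ' == (t ++ t).getD (i + t.length - 1 - j) ' ')) = true) ↔
      (t.rotate i = (t.rotate i).reverse) := by
  rw [pal_iff_half, List.all_eq_true]
  constructor
  · intro h j hj
    rw [List.length_rotate] at hj
    have := h j (List.mem_range.mpr (by omega))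
    rw [beq_iff_eq, doubled_getD t i j hi (by omega),
        show i + t.length - 1 - j = i + (t.length - 1 - j) by omega,
        doubled_getD t i (t.length - 1 - j) hi (by omega)] at this
    rw [List.length_rotate]
    exact this
  · intro h j hj
    rw [List.mem_range] at hj
    have := h j (by rw [List.length_rotate]; omega)
    rw [List.length_rotate] at this
    rw [beq_iff_eq, doubled_getD t i j hi (by omega),
        show i + t.length - 1 - j = i + (t.length - 1 - j) by omega,
        doubled_getD t i (t.length - 1 - j) hi (by omega)]
    exact this

-- A's loop decides "some rotation with index in [c, n) is a palindrome", under the fuel invariant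
theorem palLoopA_spec (t : List Char) (f c : Nat) (hc : c + f = t.length - 1) (hn : 0 < t.length) :
    palLoopA (t.rotate c) c f =
      decide (∃ i < t.length, c ≤ i ∧ t.rotate i = (t.rotate i).reverse) := by
  induction f generalizing c with
  | zero =>
    rw [palLoopA]
    split_ifs with h1 h2
    · symm; rw [decide_eq_true_iff]
      exact ⟨c, by omega, le_refl _, h1⟩
    · exfalso; rw [List.length_rotate] at h2; omega
    · symm; rw [decide_eq_false_iff_not]
      rintro ⟨i, hilt, hci, hp⟩
      have : i = c := by omega
      exact h1 (this ▸ hp)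
  | succ f ih =>
    rw [palLoopA]
    split_ifs with h1 h2
    · symm; rw [decide_eq_true_iff]
      exact ⟨c, by omega, le_refl _, h1⟩
    · rw [rot_step t c hn, ih (c + 1) (by omega), decide_eq_decide]
      constructor
      · rintro ⟨i, hilt, hci, hp⟩
        exact ⟨i, hilt, by omega, hp⟩
      · rintro ⟨i, hilt, hci, hp⟩
        rcases Nat.eq_or_lt_of_le hci with rfl | hlt
        · exact absurd hp h1
        · exact ⟨i, hilt, by omega, hp⟩
    · exfalso; rw [List.length_rotate] at h2; omega

-- ===== VERDICT (by name: the statement is the Claim_ definition above) =====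
theorem palindron_spec : Claim_equal_palindron := by
  intro text _
  show palLoopA text.toList 0 (text.toList.length - 1) =
    (text.toList.length == 0 ||
      (List.range text.toList.length).any (fun i =>
        (List.range (text.toList.length / 2)).all (fun j =>
          (text.toList ++ text.toList).getD (i + j) ' ' ==
            (text.toList ++ text.toList).getD (i + text.toList.length - 1 - j) ' ')))
  set t := text.toList with ht
  rcases Nat.eq_zero_or_pos t.length with h0 | hpos
  · rw [List.length_eq_zero_iff] at h0
    simp [h0, palLoopA]
  · have key := palLoopA_spec t (t.length - 1) 0 (by omega) hpos
    rw [List.rotate_zero] at key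
    have hne : (t.length == 0) = false := beq_eq_false_iff_ne.mpr (by omega)
    rw [key, hne, Bool.false_or]
    rw [Bool.eq_iff_iff, decide_eq_true_iff, List.any_eq_true]
    constructor
    · rintro ⟨i, hilt, -, hp⟩
      exact ⟨i, List.mem_range.mpr hilt, (inner_all_iff t i hilt).mpr hp⟩
    · rintro ⟨i, hmem, hall⟩
      rw [List.mem_range] at hmem
      exact ⟨i, hmem, Nat.zero_le i, (inner_all_iff t i hmem).mp hall⟩
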